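-- pv_equiv track=rewrite | github.com/AntonioFuziy/coding-interviews | leetcode/interviews/river.py | compute_pond_sizes
-- ===== SOURCE A (Python) =====
-- def check_neighbors(land: list[list[int]], i: int, j: int, size: int) -> int:
--   buffer = []
--   buffer.append([i, j])
--   land[i][j] = -1
--   river_size = 1
--   while len(buffer) > 0:
--     [x, y] = buffer[0]
--     buffer = buffer[1:]
--     for r in [-1, 0, 1]:
--       for c in [-1, 0, 1]:
--         if x+r >= 0 and y+c >= 0 and x+r < size and y+c < size and land[x+r][y+c] == 0:
--           land[x+r][y+c] = -1
--           river_size += 1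
--           buffer.append([x+r, y+c])
--   return river_size
--
-- def compute_pond_sizes(land: list[list[int]]) -> list[int]:
--   river_sizes = []
--   for i in range(len(land)):
--     for j in range(len(land[i])):
--       if land[i][j] == 0:
--         river_sizes.append(check_neighbors(land, i, j, len(land)))
--
--   for i in range(len(land)):
--     for j in range(len(land[i])):
--       if land[i][j] == -1:
--         land[i][j] = 0
--   return river_sizes
-- ===== SOURCE B (Python) =====
-- def compute_pond_sizes(land: list[list[int]]) -> list[int]:
--     n = len(land)
--     visited = set()
--     sizes = []
--     for i in range(len(land)):
--         for j in range(len(land[i])):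
--             if land[i][j] == 0 and (i, j) not in visited:
--                 stack = [(i, j)]
--                 count = 0
--                 while stack:
--                     x, y = stack.pop()
--                     if (x, y) in visited or land[x][y] != 0:
--                         continue
--                     visited.add((x, y))
--                     count += 1
--                     for a in range(x - 1, x + 2):
--                         for b in range(y - 1, y + 2):
--                             if 0 <= a < n and 0 <= b < n:
--                                 stack.append((a, b))
--                 sizes.append(count)
--     return sizes
-- ===== Notes on version B (the rewrite author's own statement) =====
-- stated objective: alternative
-- what changed: Replaced the BFS queue (with O(k) buffer[1:] re-slicing, in-place -1 marking of the grid and a final restore pass) by an iterative stack-based DFS that validates cells on pop against a pure visited set, never mutating the grid.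
-- outside the precondition, e.g. on compute_pond_sizes([[0, 9, 9], [9, 9, 9], [1]]): A returns [1], B returns [1]
import Mathlib
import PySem

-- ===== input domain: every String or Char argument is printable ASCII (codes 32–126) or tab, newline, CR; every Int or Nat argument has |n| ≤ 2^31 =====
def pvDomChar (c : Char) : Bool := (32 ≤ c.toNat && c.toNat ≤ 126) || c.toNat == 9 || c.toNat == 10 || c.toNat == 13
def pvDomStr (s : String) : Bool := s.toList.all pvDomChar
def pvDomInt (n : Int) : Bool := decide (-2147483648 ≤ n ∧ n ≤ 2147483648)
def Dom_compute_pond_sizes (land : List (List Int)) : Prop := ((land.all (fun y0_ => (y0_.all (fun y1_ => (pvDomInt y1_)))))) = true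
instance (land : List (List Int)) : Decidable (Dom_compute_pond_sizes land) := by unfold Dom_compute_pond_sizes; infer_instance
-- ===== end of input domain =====

-- B replaces A's BFS queue (with buffer[1:] re-slicing, in-place -1 marking and a final
-- restore pass) by an iterative stack-based DFS validating cells on pop against a pure
-- visited set; equivalence is about the RETURN value (A temporarily mutates `land` and its
-- restore pass also turns pre-existing -1 entries into 0; B never mutates `land`).

-- ===== PORT A =====
-- land[x][y] read; the `.getD 1` / `none => 1` branches are reached only where the Python
-- indexing would raise IndexError (excluded by Pre_); 1 is an arbitrary non-zero value.
def pvVal (g : List (List Int)) (p : Int × Int) : Int :=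
  match PySem.List.pyGet? g p.1 with
  | some row => (PySem.List.pyGet? row p.2).getD 1
  | none => 1

-- land[x][y] = v; only invoked on cells that were just read as 0, hence in range.
def pvSet (g : List (List Int)) (x y v : Int) : List (List Int) :=
  g.set x.toNat ((g.getD x.toNat []).set y.toNat v)

def pvShape (g : List (List Int)) : List Nat := g.map List.length

def pvCellsSh (sh : List Nat) : List (Int × Int) :=
  (List.range sh.length).flatMap (fun i => (List.range (sh.getD i 0)).map (fun (j : Nat) => ((i : Int), (j : Int))))

-- fuel bound for the worklist loops (a totality guard only, not part of A's algorithm)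
def pvZeroCount (g : List (List Int)) : Nat :=
  ((pvCellsSh (pvShape g)).filter (fun p => pvVal g p == 0)).length

def pvOffs : List Int := [-1, 0, 1]

-- body of A's nested `for r … for c …` neighbour scan (validate-and-mark at enqueue)
def pvStepA (n x y : Int) (st : List (List Int) × Int × List (Int × Int)) (r c : Int) :
    List (List Int) × Int × List (Int × Int) :=
  if 0 ≤ x + r ∧ 0 ≤ y + c ∧ x + r < n ∧ y + c < n ∧ pvVal st.1 (x + r, y + c) = 0 then
    (pvSet st.1 (x + r) (y + c) (-1), st.2.1 + 1, st.2.2 ++ [(x + r, y + c)])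
  else st

def pvInnerA (n x y : Int) (st : List (List Int) × Int × List (Int × Int)) :
    List (List Int) × Int × List (Int × Int) :=
  pvOffs.foldl (fun st r => pvOffs.foldl (fun st c => pvStepA n x y st r c) st) st

-- A's `while len(buffer) > 0` loop
def bfsLoopA : Nat → List (List Int) → List (Int × Int) → Int → Int → List (List Int) × Int
  | 0, g, _, _, riv => (g, riv)
  | _ + 1, g, [], _, riv => (g, riv)
  | fuel + 1, g, (x, y) :: rest, n, riv =>
      let st := pvInnerA n x y (g, riv, rest)
      bfsLoopA fuel st.1 st.2.2 n st.2.1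

def check_neighbors (g : List (List Int)) (i j size : Int) : List (List Int) × Int :=
  let g1 := pvSet g i j (-1)
  bfsLoopA (9 * pvZeroCount g1 + 1) g1 [(i, j)] size 1

def compute_pond_sizes (land : List (List Int)) : List Int :=
  let n : Int := (land.length : Int)
  let st :=
    (List.range land.length).foldl
      (fun (st : List (List Int) × List Int) (i : Nat) =>
        (List.range ((st.1.getD i []).length)).foldl
          (fun (st : List (List Int) × List Int) (j : Nat) =>
            if pvVal st.1 ((i : Int), (j : Int)) = 0 then
              let r := check_neighbors st.1 (i : Int) (j : Int) n
              (r.1, st.2 ++ [r.2])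
            else st)
          st)
      (land, ([] : List Int))
  -- A's final pass restores the grid in place; it does not touch the returned list
  let _restored := st.1.map (fun row => row.map (fun v => if v = -1 then 0 else v))
  st.2

-- ===== PORT B =====
-- the in-box neighbour square `for a in range(x-1,x+2): for b in range(y-1,y+2)` of Source B
def pvNbrs (n x y : Int) : List (Int × Int) :=
  (PySem.List.pyRange (x - 1) (x + 2) 1).foldl (fun acc a =>
    (PySem.List.pyRange (y - 1) (y + 2) 1).foldl (fun acc b =>
      if 0 ≤ a ∧ a < n ∧ 0 ≤ b ∧ b < n then acc ++ [(a, b)] else acc) acc) []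

-- Source B's `while stack` loop; the stack is kept top-first here, and list.pop() takes the
-- last pushed element, so the appended neighbours arrive reversed.
def dfsLoopB : Nat → List (List Int) → Int → List (Int × Int) → List (Int × Int) → Int →
    List (Int × Int) × Int
  | 0, _, _, vis, _, cnt => (vis, cnt)
  | _ + 1, _, _, vis, [], cnt => (vis, cnt)
  | fuel + 1, g0, n, vis, p :: rest, cnt =>
      if p ∈ vis ∨ ¬ pvVal g0 p = 0 then dfsLoopB fuel g0 n vis rest cnt
      else dfsLoopB fuel g0 n (PySem.Set.add vis p) ((pvNbrs n p.1 p.2).reverse ++ rest) (cnt + 1)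

def compute_pond_sizes_alt (land : List (List Int)) : List Int :=
  let n : Int := (land.length : Int)
  ((List.range land.length).foldl
      (fun (st : List (Int × Int) × List Int) (i : Nat) =>
        (List.range ((land.getD i []).length)).foldl
          (fun (st : List (Int × Int) × List Int) (j : Nat) =>
            if pvVal land ((i : Int), (j : Int)) = 0 ∧ ((i : Int), (j : Int)) ∉ st.1 then
              let r := dfsLoopB (9 * pvZeroCount land + 1) land n st.1 [((i : Int), (j : Int))] 0
              (r.1, st.2 ++ [r.2])
            else st)
          st)
      (([] : List (Int × Int)), ([] : List Int))).2

-- ===== PRECONDITION & SPEC =====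
-- Pre_ excludes grids that contain a 0 while some row is shorter than len(land): there A's
-- fixed square bound len(land) can index past a short row and raise IndexError (B raises
-- there too); it is a conservative crash region, and on the ragged grids it excludes where
-- no short row is ever reached both Pythons still return the same value.
def Pre_compute_pond_sizes (land : List (List Int)) : Prop :=
  (∀ row ∈ land, land.length ≤ row.length) ∨ (∀ row ∈ land, ∀ x ∈ row, x ≠ 0)

instance (land : List (List Int)) : Decidable (Pre_compute_pond_sizes land) := by
  unfold Pre_compute_pond_sizes; infer_instance

def pvWitness_compute_pond_sizes : List (List Int) := [[0, 1], [1, 0]]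

def Spec_compute_pond_sizes (land : List (List Int)) (out : List Int) : Prop :=
  out = compute_pond_sizes_alt land
instance (land : List (List Int)) (out : List Int) : Decidable (Spec_compute_pond_sizes land out) := by
  unfold Spec_compute_pond_sizes; infer_instance

-- ===== CLAIM (what is proved, stated in full; the proofs are below) =====
def Claim_equal_compute_pond_sizes : Prop :=
  ∀ (land : List (List Int)), Dom_compute_pond_sizes land → Pre_compute_pond_sizes land →
    Spec_compute_pond_sizes land (compute_pond_sizes land)

-- ===== LEMMAS AND PROOFS =====
-- The two ports agree on ALL inputs (both treat an index past a short row as a non-zero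
-- cell, exactly where the Pythons raise), so the proof below does not need to case on
-- Pre_; Pre_'s role is to delimit where the Python originals return normally.

-- proof-side vocabulary ------------------------------------------------------------
def pvInB (n : Int) (p : Int × Int) : Prop := 0 ≤ p.1 ∧ p.1 < n ∧ 0 ≤ p.2 ∧ p.2 < n

def pvAdj (a b : Int × Int) : Prop :=
  a.1 - 1 ≤ b.1 ∧ b.1 ≤ a.1 + 1 ∧ a.2 - 1 ≤ b.2 ∧ b.2 ≤ a.2 + 1

-- one expansion step of the flood fill, avoiding the already-marked set W
def pvRel (g0 : List (List Int)) (n : Int) (W : Finset (Int × Int)) (a b : Int × Int) : Prop :=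
  pvInB n b ∧ pvAdj a b ∧ pvVal g0 b = 0 ∧ b ∉ W

def pvReach (g0 : List (List Int)) (n : Int) (W : Finset (Int × Int)) : (Int × Int) → (Int × Int) → Prop :=
  Relation.ReflTransGen (pvRel g0 n W)

-- target set of A's loop: marked cells plus everything reachable from the (marked) buffer
def pvFinalA (g0 : List (List Int)) (n : Int) (W : Finset (Int × Int)) (S : Set (Int × Int)) : Set (Int × Int) :=
  ↑W ∪ {q | ∃ s ∈ S, pvReach g0 n W s q}

-- target set of B's loop: visited plus everything reachable from the still-valid stack cells
def pvFinalB (g0 : List (List Int)) (n : Int) (W : Finset (Int × Int)) (S : Set (Int × Int)) : Set (Int × Int) :=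
  ↑W ∪ {q | ∃ s ∈ S, s ∉ W ∧ pvVal g0 s = 0 ∧ pvReach g0 n W s q}

def pvWok (g0 : List (List Int)) (W : Finset (Int × Int)) : Prop :=
  ∀ p ∈ W, 0 ≤ p.1 ∧ 0 ≤ p.2 ∧ pvVal g0 p = 0

-- A's mutated grid g carries exactly the marks W over the pristine grid g0
def pvGRel (g0 : List (List Int)) (W : Finset (Int × Int)) (g : List (List Int)) : Prop :=
  pvShape g = pvShape g0 ∧
  ∀ p : Int × Int, 0 ≤ p.1 → 0 ≤ p.2 → pvVal g p = (if p ∈ W then -1 else pvVal g0 p)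

def pvZf (g : List (List Int)) : Finset (Int × Int) :=
  ((pvCellsSh (pvShape g)).filter (fun p => pvVal g p == 0)).toFinset

theorem pv_val_eq (g : List (List Int)) (x y : Int) (hx : 0 ≤ x) (hy : 0 ≤ y) :
    pvVal g (x, y) = (g[x.toNat]?).elim 1 (fun row => (row[y.toNat]?).getD 1) := by
  unfold pvVal
  rw [show ((x,y).1) = x from rfl, show ((x,y).2) = y from rfl]
  rw [show PySem.List.pyGet? g x = g[x.toNat]? from PySem.List.pyGet?_of_nonneg g hx]
  cases g[x.toNat]? with
  | none => rfl
  | some row => simp [PySem.List.pyGet?_of_nonneg row hy]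

theorem pv_val_zero (g : List (List Int)) (x y : Int) (hx : 0 ≤ x) (hy : 0 ≤ y)
    (h : pvVal g (x, y) = 0) :
    ∃ row, g[x.toNat]? = some row ∧ row[y.toNat]? = some 0 := by
  rw [pv_val_eq g x y hx hy] at h
  cases hrow : g[x.toNat]? with
  | none => rw [hrow] at h; simp at h
  | some row =>
    rw [hrow] at h
    simp only [Option.elim] at h
    cases hc : row[y.toNat]? with
    | none => rw [hc] at h; simp at h
    | some v => rw [hc] at h; simp at h; exact ⟨row, rfl, by rw [hc, h]⟩

theorem pv_mem_cellsSh (sh : List Nat) (p : Int × Int) :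
    p ∈ pvCellsSh sh ↔ ∃ i j : Nat, i < sh.length ∧ j < sh.getD i 0 ∧ p = ((i : Int), (j : Int)) := by
  unfold pvCellsSh
  constructor
  · intro h
    obtain ⟨a, ha, hb⟩ := List.mem_flatMap.mp h
    obtain ⟨j, hj, hpe⟩ := List.mem_map.mp hb
    exact ⟨a, j, List.mem_range.mp ha, List.mem_range.mp hj, hpe.symm⟩
  · rintro ⟨i, j, hi, hj, rfl⟩
    exact List.mem_flatMap.mpr ⟨i, List.mem_range.mpr hi, List.mem_map.mpr ⟨j, List.mem_range.mpr hj, rfl⟩⟩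

theorem pv_val_zero_mem (g : List (List Int)) (p : Int × Int) (hx : 0 ≤ p.1) (hy : 0 ≤ p.2)
    (h : pvVal g p = 0) : p ∈ pvCellsSh (pvShape g) := by
  obtain ⟨px, py⟩ := p
  obtain ⟨row, hrow, hc⟩ := pv_val_zero g px py hx hy h
  rw [pv_mem_cellsSh]
  have hxl : px.toNat < g.length := by
    by_contra hcon
    rw [List.getElem?_eq_none (by omega)] at hrow; simp at hrow
  have hyl : py.toNat < row.length := by
    by_contra hcon
    rw [List.getElem?_eq_none (by omega)] at hc; simp at hc
  refine ⟨px.toNat, py.toNat, ?_, ?_, ?_⟩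
  · simpa [pvShape]
  · have : (pvShape g).getD px.toNat 0 = row.length := by
      unfold pvShape
      rw [List.getD_eq_getElem _ _ (by simpa using hxl)]
      simp only [List.getElem_map]
      have := List.getElem?_eq_getElem hxl
      rw [this] at hrow
      simp at hrow; rw [hrow]
    omega
  · simp [Prod.ext_iff]; omega

theorem pv_shape_pvSet (g : List (List Int)) (x y v : Int) :
    pvShape (pvSet g x y v) = pvShape g := by
  unfold pvSet pvShape
  rw [List.map_set]
  by_cases hx : x.toNat < g.length
  · rw [List.length_set]
    rw [List.getD_eq_getElem _ _ hx]
    have : (g.map List.length).set x.toNat g[x.toNat].length = g.map List.length := by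
      have h2 : (g.map List.length)[x.toNat]'(by simpa using hx) = g[x.toNat].length := List.getElem_map List.length
      rw [← h2]
      exact List.set_getElem_self (by simpa using hx)
    simpa using this
  · rw [List.set_eq_of_length_le (by simpa using Nat.le_of_not_lt hx)]

theorem pv_val_pvSet (g : List (List Int)) (x y v : Int) (hx : 0 ≤ x) (hy : 0 ≤ y)
    (row : List Int) (hrow : g[x.toNat]? = some row) (hyl : y.toNat < row.length) :
    ∀ q : Int × Int, 0 ≤ q.1 → 0 ≤ q.2 →
      pvVal (pvSet g x y v) q = if q = (x, y) then v else pvVal g q := by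
  rintro ⟨qx, qy⟩ hqx hqy
  simp only at hqx hqy
  have hxl : x.toNat < g.length := by
    by_contra hcon
    rw [List.getElem?_eq_none (by omega)] at hrow; simp at hrow
  have hgd : g.getD x.toNat [] = row := by
    rw [List.getD_eq_getElem _ _ hxl]
    have := List.getElem?_eq_getElem hxl
    rw [this] at hrow; simpa using hrow
  rw [pv_val_eq _ qx qy hqx hqy, pv_val_eq g qx qy hqx hqy]
  unfold pvSet
  rw [hgd]
  by_cases hqx2 : qx = x
  · subst hqx2
    rw [List.getElem?_set_self (by omega)]
    by_cases hqy2 : qy = y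
    · subst hqy2
      simp [List.getElem?_set_self hyl]
    · have hne : qy.toNat ≠ y.toNat := by omega
      rw [if_neg (by simp [Prod.ext_iff, hqy2])]
      simp [List.getElem?_set_ne (Ne.symm hne), hrow]
  · have hne : qx.toNat ≠ x.toNat := by omega
    rw [List.getElem?_set_ne (Ne.symm hne), if_neg (by simp [Prod.ext_iff, hqx2])]

theorem pv_grel_val (g0 : List (List Int)) (W : Finset (Int × Int)) (g : List (List Int))
    (hG : pvGRel g0 W g) (p : Int × Int) (hx : 0 ≤ p.1) (hy : 0 ≤ p.2) :
    pvVal g p = 0 ↔ (pvVal g0 p = 0 ∧ p ∉ W) := by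
  rw [hG.2 p hx hy]
  by_cases hp : p ∈ W <;> simp [hp]

theorem pv_grel_insert (g0 : List (List Int)) (W : Finset (Int × Int)) (g : List (List Int))
    (hG : pvGRel g0 W g) (s : Int × Int) (hx : 0 ≤ s.1) (hy : 0 ≤ s.2)
    (hz : pvVal g s = 0) :
    pvGRel g0 (insert s W) (pvSet g s.1 s.2 (-1)) := by
  obtain ⟨row, hrow, hc⟩ := pv_val_zero g s.1 s.2 hx hy (by rw [← hz])
  have hyl : s.2.toNat < row.length := by
    by_contra hcon
    rw [List.getElem?_eq_none (by omega)] at hc; simp at hc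
  have hset := pv_val_pvSet g s.1 s.2 (-1) hx hy row hrow hyl
  constructor
  · rw [pv_shape_pvSet]; exact hG.1
  · intro q hqx hqy
    rw [hset q hqx hqy]
    by_cases hq : q = s
    · subst hq; simp
    · rw [if_neg (by simpa [Prod.ext_iff] using hq)]
      rw [hG.2 q hqx hqy]
      simp [Finset.mem_insert, hq]

theorem pv_wok_insert (g0 : List (List Int)) (W : Finset (Int × Int)) (hW : pvWok g0 W)
    (s : Int × Int) (hx : 0 ≤ s.1) (hy : 0 ≤ s.2) (hz : pvVal g0 s = 0) :
    pvWok g0 (insert s W) := by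
  intro p hp
  rcases Finset.mem_insert.mp hp with h | h
  · subst h; exact ⟨hx, hy, hz⟩
  · exact hW p h

theorem pv_mem_Zf (g : List (List Int)) (p : Int × Int) :
    p ∈ pvZf g ↔ p ∈ pvCellsSh (pvShape g) ∧ pvVal g p = 0 := by
  unfold pvZf
  simp

theorem pv_cells_nonneg (sh : List Nat) (p : Int × Int) (h : p ∈ pvCellsSh sh) :
    0 ≤ p.1 ∧ 0 ≤ p.2 := by
  rw [pv_mem_cellsSh] at h
  obtain ⟨i, j, _, _, rfl⟩ := h
  exact ⟨Int.natCast_nonneg i, Int.natCast_nonneg j⟩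

theorem pv_Zf_eq (g0 : List (List Int)) (W : Finset (Int × Int)) (g : List (List Int))
    (hG : pvGRel g0 W g) (_hW : pvWok g0 W) : pvZf g = pvZf g0 \ W := by
  ext p
  rw [pv_mem_Zf, Finset.mem_sdiff, pv_mem_Zf, hG.1]
  constructor
  · rintro ⟨hc, hz⟩
    obtain ⟨hx, hy⟩ := pv_cells_nonneg _ _ hc
    have := (pv_grel_val g0 W g hG p hx hy).mp hz
    exact ⟨⟨hc, this.1⟩, this.2⟩
  · rintro ⟨⟨hc, hz⟩, hnW⟩
    obtain ⟨hx, hy⟩ := pv_cells_nonneg _ _ hc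
    exact ⟨hc, (pv_grel_val g0 W g hG p hx hy).mpr ⟨hz, hnW⟩⟩

theorem pv_card_Zf_le (g : List (List Int)) : (pvZf g).card ≤ pvZeroCount g :=
  List.toFinset_card_le _

theorem pv_nbrs_eq (n x y : Int) :
    pvNbrs n x y = (PySem.List.pyRange (x - 1) (x + 2) 1).flatMap (fun a =>
      ((PySem.List.pyRange (y - 1) (y + 2) 1).filter
        (fun b => decide (0 ≤ a ∧ a < n ∧ 0 ≤ b ∧ b < n))).map (fun b => (a, b))) := by
  unfold pvNbrs
  rw [PySem.List.foldl_congr_mem _ _ (fun acc a => acc ++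
      ((PySem.List.pyRange (y - 1) (y + 2) 1).filter
        (fun b => decide (0 ≤ a ∧ a < n ∧ 0 ≤ b ∧ b < n))).map (fun b => (a, b))) _
      (by intro acc a _; exact PySem.List.foldl_append_ite _ _ _ _)]
  rw [PySem.List.foldl_append_eq_flatMap]
  simp

theorem pv_mem_nbrs (n x y : Int) (q : Int × Int) :
    q ∈ pvNbrs n x y ↔ pvInB n q ∧ pvAdj (x, y) q := by
  rw [pv_nbrs_eq]
  obtain ⟨q1, q2⟩ := q
  constructor
  · intro h
    rw [List.mem_flatMap] at h
    obtain ⟨a, ha, h2⟩ := h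
    rw [List.mem_map] at h2
    obtain ⟨b, hb, heq⟩ := h2
    rw [List.mem_filter] at hb
    obtain ⟨hb1, hb2⟩ := hb
    rw [PySem.List.mem_pyRange_one] at ha hb1
    rw [decide_eq_true_eq] at hb2
    have h1 : a = q1 := congrArg Prod.fst heq
    have h2 : b = q2 := congrArg Prod.snd heq
    subst h1; subst h2
    constructor
    · exact ⟨hb2.1, hb2.2.1, hb2.2.2.1, hb2.2.2.2⟩
    · exact ⟨by omega, by omega, by omega, by omega⟩
  · rintro ⟨⟨h1, h2, h3, h4⟩, ⟨h5, h6, h7, h8⟩⟩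
    rw [List.mem_flatMap]
    refine ⟨q1, PySem.List.mem_pyRange_one.mpr ⟨by omega, by omega⟩, List.mem_map.mpr
      ⟨q2, List.mem_filter.mpr ⟨PySem.List.mem_pyRange_one.mpr ⟨by omega, by omega⟩,
        decide_eq_true_eq.mpr ⟨h1, h2, h3, h4⟩⟩, rfl⟩⟩

theorem pv_length_nbrs_le (n x y : Int) : (pvNbrs n x y).length ≤ 9 := by
  rw [pv_nbrs_eq]
  rw [List.length_flatMap]
  have hlen : ∀ a : Int, (((PySem.List.pyRange (y - 1) (y + 2) 1).filter
      (fun b => decide (0 ≤ a ∧ a < n ∧ 0 ≤ b ∧ b < n))).map (fun b => ((a, b) : Int × Int))).length ≤ 3 := by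
    intro a
    rw [List.length_map]
    calc _ ≤ (PySem.List.pyRange (y - 1) (y + 2) 1).length := List.length_filter_le _ _
    _ = 3 := by rw [PySem.List.length_pyRange_one]; omega
  calc ((PySem.List.pyRange (x - 1) (x + 2) 1).map _).sum
      ≤ ((PySem.List.pyRange (x - 1) (x + 2) 1).map (fun _ => 3)).sum := by
        apply List.sum_le_sum
        intro a ha
        exact hlen a
    _ ≤ 9 := by
        rw [List.map_const', List.sum_replicate, PySem.List.length_pyRange_one]
        have h3 : (x + 2 - (x - 1)).toNat = 3 := by omega
        rw [h3]; simp

theorem pv_rel_mono (g0 : List (List Int)) (n : Int) (W W' : Finset (Int × Int)) (hWW : W ⊆ W')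
    (a b : Int × Int) (h : pvRel g0 n W' a b) : pvRel g0 n W a b :=
  ⟨h.1, h.2.1, h.2.2.1, fun hb => h.2.2.2 (hWW hb)⟩

theorem pv_reach_mono (g0 : List (List Int)) (n : Int) (W W' : Finset (Int × Int)) (hWW : W ⊆ W')
    (a b : Int × Int) (h : pvReach g0 n W' a b) : pvReach g0 n W a b :=
  Relation.ReflTransGen.mono (fun x y hxy => pv_rel_mono g0 n W W' hWW x y hxy) h

theorem pv_avoid_self (g0 : List (List Int)) (n : Int) (W : Finset (Int × Int)) (s q : Int × Int)
    (h : pvReach g0 n W s q) : q = s ∨ pvReach g0 n (insert s W) s q := by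
  induction h with
  | refl => exact Or.inl rfl
  | tail hab hbc ih =>
    rename_i b c
    by_cases hc : c = s
    · exact Or.inl hc
    · rcases ih with rfl | ih
      · exact Or.inr (Relation.ReflTransGen.single
          ⟨hbc.1, hbc.2.1, hbc.2.2.1, by simp [hc, hbc.2.2.2]⟩)
      · exact Or.inr (ih.tail ⟨hbc.1, hbc.2.1, hbc.2.2.1, by simp [hc, hbc.2.2.2]⟩)

theorem pv_avoid_extra (g0 : List (List Int)) (n : Int) (W : Finset (Int × Int)) (s t q : Int × Int)
    (h : pvReach g0 n W t q) : pvReach g0 n (insert s W) t q ∨ pvReach g0 n W s q := by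
  induction h with
  | refl => exact Or.inl Relation.ReflTransGen.refl
  | tail hab hbc ih =>
    rename_i b c
    by_cases hc : c = s
    · subst hc; exact Or.inr Relation.ReflTransGen.refl
    · rcases ih with ih | ih
      · exact Or.inl (ih.tail ⟨hbc.1, hbc.2.1, hbc.2.2.1, by simp [hc, hbc.2.2.2]⟩)
      · exact Or.inr (ih.tail hbc)

theorem pv_finalA_nil (g0 : List (List Int)) (n : Int) (W : Finset (Int × Int)) :
    pvFinalA g0 n W {q | q ∈ ([] : List (Int × Int))} = ↑W := by
  unfold pvFinalA; simp

theorem pv_finalB_nil (g0 : List (List Int)) (n : Int) (W : Finset (Int × Int)) :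
    pvFinalB g0 n W {q | q ∈ ([] : List (Int × Int))} = ↑W := by
  unfold pvFinalB; simp

-- a path that starts in the freshly discovered cells N stays inside the final set
theorem pv_helperA (g0 : List (List Int)) (n : Int) (W : Finset (Int × Int)) (N : List (Int × Int))
    (S : Set (Int × Int)) (s q : Int × Int) (hsrc : s ∈ S ∨ s ∈ N)
    (h : pvReach g0 n W s q) : q ∈ pvFinalA g0 n (W ∪ N.toFinset) (S ∪ {q | q ∈ N}) := by
  have key : q = s ∨ q ∈ N ∨ (q ∉ W ∧ q ∉ N ∧ ∃ t, (t ∈ S ∨ t ∈ N) ∧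
      pvReach g0 n (W ∪ N.toFinset) t q) := by
    induction h with
    | refl => exact Or.inl rfl
    | tail hab hbc ih =>
      rename_i b c
      by_cases hcN : c ∈ N
      · exact Or.inr (Or.inl hcN)
      · have hcW : c ∉ W := hbc.2.2.2
        have hcWN : c ∉ W ∪ N.toFinset := by
          simp [Finset.mem_union, List.mem_toFinset, hcW, hcN]
        refine Or.inr (Or.inr ⟨hcW, hcN, ?_⟩)
        rcases ih with rfl | hbN | ⟨hbW, hbN, t, ht, hreach⟩
        · exact ⟨_, hsrc, Relation.ReflTransGen.single ⟨hbc.1, hbc.2.1, hbc.2.2.1, hcWN⟩⟩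
        · exact ⟨b, Or.inr hbN, Relation.ReflTransGen.single ⟨hbc.1, hbc.2.1, hbc.2.2.1, hcWN⟩⟩
        · exact ⟨t, ht, hreach.tail ⟨hbc.1, hbc.2.1, hbc.2.2.1, hcWN⟩⟩
  rcases key with rfl | hqN | ⟨_, _, t, ht, hreach⟩
  · rcases hsrc with hs | hs
    · exact Or.inr ⟨q, Or.inl hs, Relation.ReflTransGen.refl⟩
    · exact Or.inr ⟨q, Or.inr hs, Relation.ReflTransGen.refl⟩
  · exact Or.inr ⟨q, Or.inr hqN, Relation.ReflTransGen.refl⟩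
  · exact Or.inr ⟨t, ht, hreach⟩

-- A's pop-transfer: popping the (already marked) cell x and marking its valid
-- neighbours N preserves the target set
theorem pv_finalA_step (g0 : List (List Int)) (n : Int) (W : Finset (Int × Int))
    (N : List (Int × Int)) (S : Set (Int × Int)) (x : Int × Int) (hx : x ∈ W)
    (hN : ∀ q, q ∈ N ↔ pvRel g0 n W x q) :
    pvFinalA g0 n W ({x} ∪ S) = pvFinalA g0 n (W ∪ N.toFinset) (S ∪ {q | q ∈ N}) := by
  apply Set.Subset.antisymm
  · rintro q (hq | ⟨s, hs, hreach⟩)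
    · exact Or.inl (Finset.mem_union_left _ hq)
    · rcases hs with rfl | hs
      · rcases Relation.ReflTransGen.cases_head hreach with rfl | ⟨y, hsy, hyq⟩
        · exact Or.inl (Finset.mem_union_left _ hx)
        · exact pv_helperA g0 n W N S y q (Or.inr ((hN y).mpr hsy)) hyq
      · exact pv_helperA g0 n W N S s q (Or.inl hs) hreach
  · rintro q (hq | ⟨s, hs, hreach⟩)
    · rcases Finset.mem_union.mp hq with hq | hq
      · exact Or.inl hq
      · exact Or.inr ⟨x, Or.inl rfl, Relation.ReflTransGen.single ((hN q).mp (List.mem_toFinset.mp hq))⟩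
    · have hreach' : pvReach g0 n W s q :=
        pv_reach_mono g0 n W _ Finset.subset_union_left s q hreach
      rcases hs with hs | hs
      · exact Or.inr ⟨s, Or.inr hs, hreach'⟩
      · exact Or.inr ⟨x, Or.inl rfl, Relation.ReflTransGen.head ((hN s).mp hs) hreach'⟩

-- B's pop of a still-valid cell s: mark it and push its whole in-box neighbour square N
theorem pv_finalB_step (g0 : List (List Int)) (n : Int) (W : Finset (Int × Int))
    (N : List (Int × Int)) (S : Set (Int × Int)) (s : Int × Int) (hsW : s ∉ W)
    (hsz : pvVal g0 s = 0) (hN : ∀ q, q ∈ N ↔ pvInB n q ∧ pvAdj s q) :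
    pvFinalB g0 n W ({s} ∪ S) = pvFinalB g0 n (insert s W) (S ∪ {q | q ∈ N}) := by
  apply Set.Subset.antisymm
  · rintro q (hq | ⟨t, ht, htW, htz, hreach⟩)
    · exact Or.inl (Finset.mem_insert_of_mem hq)
    · -- a valid source t of the old stack
      have hs_case : pvReach g0 n W s q → q ∈ pvFinalB g0 n (insert s W) (S ∪ {q | q ∈ N}) := by
        intro hr
        rcases pv_avoid_self g0 n W s q hr with rfl | hr'
        · exact Or.inl (Finset.mem_insert_self _ _)
        · rcases Relation.ReflTransGen.cases_head hr' with rfl | ⟨y, hsy, hyq⟩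
          · exact Or.inl (Finset.mem_insert_self _ _)
          · refine Or.inr ⟨y, Or.inr ((hN y).mpr ⟨hsy.1, hsy.2.1⟩), hsy.2.2.2, hsy.2.2.1, hyq⟩
      rcases ht with rfl | ht
      · exact hs_case hreach
      · rcases pv_avoid_extra g0 n W s t q hreach with hr | hr
        · by_cases hts : t = s
          · subst hts; exact hs_case hreach
          · exact Or.inr ⟨t, Or.inl ht, by simp [Finset.mem_insert, hts, htW], htz, hr⟩
        · exact hs_case hr
  · rintro q (hq | ⟨t, ht, htW, htz, hreach⟩)
    · rcases Finset.mem_insert.mp hq with rfl | hq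
      · exact Or.inr ⟨q, Or.inl rfl, hsW, hsz, Relation.ReflTransGen.refl⟩
      · exact Or.inl hq
    · have hreach' : pvReach g0 n W t q :=
        pv_reach_mono g0 n W _ (Finset.subset_insert _ _) t q hreach
      have htW' : t ∉ W := fun h => htW (Finset.mem_insert_of_mem h)
      rcases ht with ht | ht
      · exact Or.inr ⟨t, Or.inr ht, htW', htz, hreach'⟩
      · -- t is one of the pushed neighbours: prepend the step s → t
        have hst : pvRel g0 n W s t := ⟨((hN t).mp ht).1, ((hN t).mp ht).2, htz, htW'⟩
        exact Or.inr ⟨s, Or.inl rfl, hsW, hsz, Relation.ReflTransGen.head hst hreach'⟩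

-- B's pop of an invalid (already visited or non-zero) cell contributes nothing
theorem pv_finalB_drop (g0 : List (List Int)) (n : Int) (W : Finset (Int × Int))
    (S : Set (Int × Int)) (s : Int × Int) (hs : s ∈ W ∨ ¬ pvVal g0 s = 0) :
    pvFinalB g0 n W ({s} ∪ S) = pvFinalB g0 n W S := by
  unfold pvFinalB
  apply Set.Subset.antisymm
  · rintro q (hq | ⟨t, ht, htW, htz, hreach⟩)
    · exact Or.inl hq
    · rcases ht with rfl | ht
      · rcases hs with hs | hs
        · exact absurd hs htW
        · exact absurd htz hs
      · exact Or.inr ⟨t, ht, htW, htz, hreach⟩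
  · rintro q (hq | ⟨t, ht, htW, htz, hreach⟩)
    · exact Or.inl hq
    · exact Or.inr ⟨t, Or.inr ht, htW, htz, hreach⟩

-- at seed time the two loops' target sets coincide
theorem pv_seed_sets (g0 : List (List Int)) (n : Int) (W : Finset (Int × Int)) (s : Int × Int)
    (hsW : s ∉ W) (hsz : pvVal g0 s = 0) :
    pvFinalB g0 n W {s} = pvFinalA g0 n (insert s W) {s} := by
  apply Set.Subset.antisymm
  · rintro q (hq | ⟨t, ht, htW, htz, hreach⟩)
    · exact Or.inl (Finset.mem_insert_of_mem hq)
    · rcases ht with rfl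
      rcases pv_avoid_self g0 n W t q hreach with rfl | hr
      · exact Or.inl (Finset.mem_insert_self _ _)
      · exact Or.inr ⟨t, rfl, hr⟩
  · rintro q (hq | ⟨t, ht, hreach⟩)
    · rcases Finset.mem_insert.mp hq with rfl | hq
      · exact Or.inr ⟨q, rfl, hsW, hsz, Relation.ReflTransGen.refl⟩
      · exact Or.inl hq
    · rcases ht with rfl
      exact Or.inr ⟨t, rfl, hsW, hsz,
        pv_reach_mono g0 n W _ (Finset.subset_insert _ _) t q hreach⟩

def pvPairs : List (Int × Int) :=
  [(-1,-1),(-1,0),(-1,1),(0,-1),(0,0),(0,1),(1,-1),(1,0),(1,1)]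

theorem pv_innerA_eq (n x y : Int) (st : List (List Int) × Int × List (Int × Int)) :
    pvInnerA n x y st = pvPairs.foldl (fun st rc => pvStepA n x y st rc.1 rc.2) st := rfl

theorem pv_mem_pvPairs (rc : Int × Int) (h1 : -1 ≤ rc.1) (h2 : rc.1 ≤ 1) (h3 : -1 ≤ rc.2)
    (h4 : rc.2 ≤ 1) : rc ∈ pvPairs := by
  obtain ⟨r, c⟩ := rc
  simp only at h1 h2 h3 h4
  simp [pvPairs, Prod.ext_iff]
  omega

theorem pv_innerA_fold (g0 : List (List Int)) (n x y : Int) :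
    ∀ (L : List (Int × Int)) (W : Finset (Int × Int)) (g : List (List Int)) (riv : Int)
      (buf : List (Int × Int)),
      pvGRel g0 W g → pvWok g0 W →
      (hb : ∀ rc ∈ L, -1 ≤ rc.1 ∧ rc.1 ≤ 1 ∧ -1 ≤ rc.2 ∧ rc.2 ≤ 1) →
      (hnd : (L.map (fun rc => (x + rc.1, y + rc.2))).Nodup) →
      ∃ g' N, L.foldl (fun st rc => pvStepA n x y st rc.1 rc.2) (g, riv, buf) =
          (g', riv + (N.length : Int), buf ++ N) ∧ N.Nodup ∧
        (∀ q, q ∈ N ↔ (q ∈ L.map (fun rc => (x + rc.1, y + rc.2)) ∧ pvRel g0 n W (x, y) q)) ∧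
        pvGRel g0 (W ∪ N.toFinset) g' ∧ pvWok g0 (W ∪ N.toFinset) := by
  intro L
  induction L with
  | nil =>
    intro W g riv buf hG hW _ _
    exact ⟨g, [], by simp, List.nodup_nil, by simp, by simpa using hG, by simpa using hW⟩
  | cons rc L ih =>
    intro W g riv buf hG hW hb hnd
    obtain ⟨hr1, hr2, hr3, hr4⟩ := hb rc List.mem_cons_self
    set q : Int × Int := (x + rc.1, y + rc.2) with hqdef
    simp only [List.foldl_cons]
    by_cases hC : 0 ≤ x + rc.1 ∧ 0 ≤ y + rc.2 ∧ x + rc.1 < n ∧ y + rc.2 < n ∧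
        pvVal g (x + rc.1, y + rc.2) = 0
    · -- valid: mark q, then recurse with insert q W
      have hqx : (0:Int) ≤ q.1 := hC.1
      have hqy : (0:Int) ≤ q.2 := hC.2.1
      have hval := hC.2.2.2.2
      have hq0 : pvVal g0 q = 0 ∧ q ∉ W := (pv_grel_val g0 W g hG q hqx hqy).mp hval
      have hrel : pvRel g0 n W (x, y) q := by
        refine ⟨⟨hC.1, hC.2.2.1, hC.2.1, hC.2.2.2.1⟩, ?_, hq0.1, hq0.2⟩
        exact ⟨by simp [hqdef]; omega, by simp [hqdef]; omega, by simp [hqdef]; omega,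
          by simp [hqdef]; omega⟩
      have hstep : pvStepA n x y (g, riv, buf) rc.1 rc.2 =
          (pvSet g q.1 q.2 (-1), riv + 1, buf ++ [q]) := by
        unfold pvStepA
        rw [if_pos hC]
      have hG1 : pvGRel g0 (insert q W) (pvSet g q.1 q.2 (-1)) :=
        pv_grel_insert g0 W g hG q hqx hqy hval
      have hW1 : pvWok g0 (insert q W) := pv_wok_insert g0 W hW q hqx hqy hq0.1
      have hqnotL : q ∉ L.map (fun rc => (x + rc.1, y + rc.2)) := by
        have := hnd
        simp only [List.map_cons, List.nodup_cons] at this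
        exact this.1
      have hnd' : (L.map (fun rc => (x + rc.1, y + rc.2))).Nodup := by
        simp only [List.map_cons, List.nodup_cons] at hnd; exact hnd.2
      obtain ⟨g', N, heq, hNnd, hNmem, hG', hW'⟩ :=
        ih (insert q W) (pvSet g q.1 q.2 (-1)) (riv + 1) (buf ++ [q]) hG1 hW1
          (fun rc' h => hb rc' (List.mem_cons_of_mem _ h)) hnd' 
      refine ⟨g', q :: N, ?_, ?_, ?_, ?_, ?_⟩
      · rw [hstep, heq]
        have h1 : riv + 1 + (N.length : Int) = riv + ((q :: N).length : Int) := by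
          simp; omega
        have h2 : (buf ++ [q]) ++ N = buf ++ q :: N := by simp
        rw [h1, h2]
      · refine List.nodup_cons.mpr ⟨?_, hNnd⟩
        intro hqN
        exact ((hNmem q).mp hqN).2.2.2.2 (Finset.mem_insert_self _ _)
      · intro q'
        rw [List.mem_cons, hNmem q']
        constructor
        · rintro (rfl | ⟨hmem, hrel'⟩)
          · exact ⟨List.mem_cons_self, hrel⟩
          · refine ⟨List.mem_cons_of_mem _ hmem, pv_rel_mono g0 n W (insert q W)
              (Finset.subset_insert _ _) _ _ hrel'⟩
        · rintro ⟨hmem, hrel'⟩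
          rcases List.mem_cons.mp hmem with rfl | hmem
          · exact Or.inl rfl
          · refine Or.inr ⟨hmem, ⟨hrel'.1, hrel'.2.1, hrel'.2.2.1, ?_⟩⟩
            intro hq'
            rcases Finset.mem_insert.mp hq' with rfl | hq'
            · exact hqnotL hmem
            · exact hrel'.2.2.2 hq'
      · have : insert q W ∪ N.toFinset = W ∪ (q :: N).toFinset := by
          ext p
          simp only [Finset.mem_union, Finset.mem_insert, List.mem_toFinset, List.mem_cons]
          tauto
        rwa [this] at hG'
      · have : insert q W ∪ N.toFinset = W ∪ (q :: N).toFinset := by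
          ext p
          simp only [Finset.mem_union, Finset.mem_insert, List.mem_toFinset, List.mem_cons]
          tauto
        rwa [this] at hW'
    · -- invalid: no change for this candidate
      have hstep : pvStepA n x y (g, riv, buf) rc.1 rc.2 = (g, riv, buf) := by
        unfold pvStepA
        rw [if_neg hC]
      have hnorel : ¬ pvRel g0 n W (x, y) q := by
        rintro ⟨hin, hadj, hz, hnW⟩
        exact hC ⟨hin.1, hin.2.2.1, hin.2.1, hin.2.2.2,
          (pv_grel_val g0 W g hG q hin.1 hin.2.2.1).mpr ⟨hz, hnW⟩⟩
      have hnd' : (L.map (fun rc => (x + rc.1, y + rc.2))).Nodup := by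
        simp only [List.map_cons, List.nodup_cons] at hnd; exact hnd.2
      obtain ⟨g', N, heq, hNnd, hNmem, hG', hW'⟩ :=
        ih W g riv buf hG hW (fun rc' h => hb rc' (List.mem_cons_of_mem _ h)) hnd' 
      refine ⟨g', N, by rw [hstep, heq], hNnd, ?_, hG', hW'⟩
      intro q'
      rw [hNmem q', List.map_cons, List.mem_cons]
      constructor
      · rintro ⟨hmem, hrel'⟩; exact ⟨Or.inr hmem, hrel'⟩
      · rintro ⟨rfl | hmem, hrel'⟩
        · exact absurd hrel' hnorel
        · exact ⟨hmem, hrel'⟩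

theorem pv_cands_nodup (x y : Int) : (pvPairs.map (fun rc => (x + rc.1, y + rc.2))).Nodup := by
  refine List.Nodup.map ?_ (by decide)
  intro a b h
  rw [Prod.ext_iff] at h ⊢
  obtain ⟨h1, h2⟩ := h
  simp only at h1 h2
  constructor <;> omega

theorem pv_rel_mem_cands (g0 : List (List Int)) (n x y : Int) (W : Finset (Int × Int))
    (q : Int × Int) (h : pvRel g0 n W (x, y) q) :
    q ∈ pvPairs.map (fun rc => (x + rc.1, y + rc.2)) := by
  obtain ⟨hin, hadj, _, _⟩ := h
  obtain ⟨h1, h2, h3, h4⟩ := hadj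
  refine List.mem_map.mpr ⟨(q.1 - x, q.2 - y), pv_mem_pvPairs _ (by simp; omega) (by simp; omega)
    (by simp; omega) (by simp; omega), ?_⟩
  rw [Prod.ext_iff]
  constructor <;> simp

theorem pv_bfsA (g0 : List (List Int)) (n : Int) :
    ∀ (fuel : Nat) (W : Finset (Int × Int)) (g : List (List Int)) (buf : List (Int × Int)) (riv : Int),
      pvGRel g0 W g → pvWok g0 W → (∀ p ∈ buf, p ∈ W) →
      9 * (pvZf g0 \ W).card + buf.length ≤ fuel →
      ∃ W', W ⊆ W' ∧ pvWok g0 W' ∧ pvGRel g0 W' (bfsLoopA fuel g buf n riv).1 ∧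
        (bfsLoopA fuel g buf n riv).2 = riv + ((W'.card : Int) - (W.card : Int)) ∧
        (↑W' : Set (Int × Int)) = pvFinalA g0 n W {q | q ∈ buf} := by
  intro fuel
  induction fuel with
  | zero =>
    intro W g buf riv hG hW hbuf hfuel
    have hnil : buf = [] := List.length_eq_zero_iff.mp (by omega)
    subst hnil
    exact ⟨W, Finset.Subset.refl W, hW, hG, by simp [bfsLoopA], (pv_finalA_nil g0 n W).symm⟩
  | succ fuel ih =>
    intro W g buf riv hG hW hbuf hfuel
    match buf with
    | [] =>
      exact ⟨W, Finset.Subset.refl W, hW, hG, by simp [bfsLoopA], (pv_finalA_nil g0 n W).symm⟩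
    | (x, y) :: rest =>
      have hxy : (x, y) ∈ W := hbuf (x, y) List.mem_cons_self
      obtain ⟨g1, N, heq, hNnd, hNmem, hG1, hW1⟩ :=
        pv_innerA_fold g0 n x y pvPairs W g riv rest hG hW (by decide) (pv_cands_nodup x y)
      have hNrel : ∀ q, q ∈ N ↔ pvRel g0 n W (x, y) q := by
        intro q
        rw [hNmem q]
        exact ⟨fun h => h.2, fun h => ⟨pv_rel_mem_cands g0 n x y W q h, h⟩⟩
      have hNsub : N.toFinset ⊆ pvZf g0 \ W := by
        intro q hq
        have hrel := (hNrel q).mp (List.mem_toFinset.mp hq)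
        rw [Finset.mem_sdiff, pv_mem_Zf]
        exact ⟨⟨pv_val_zero_mem g0 q hrel.1.1 hrel.1.2.2.1 hrel.2.2.1, hrel.2.2.1⟩, hrel.2.2.2⟩
      have hdisj : Disjoint W N.toFinset := by
        rw [Finset.disjoint_right]
        intro q hq
        exact fun hqW => ((hNrel q).mp (List.mem_toFinset.mp hq)).2.2.2 hqW
      have hNcard : N.toFinset.card = N.length := List.toFinset_card_of_nodup hNnd
      have hcard1 : (W ∪ N.toFinset).card = W.card + N.length := by
        rw [Finset.card_union_of_disjoint hdisj, hNcard]
      have hsdiff : pvZf g0 \ (W ∪ N.toFinset) = (pvZf g0 \ W) \ N.toFinset := by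
        ext p
        simp only [Finset.mem_sdiff, Finset.mem_union]
        tauto
      have hcard2 : (pvZf g0 \ (W ∪ N.toFinset)).card = (pvZf g0 \ W).card - N.length := by
        rw [hsdiff, Finset.card_sdiff_of_subset hNsub, hNcard]
      have hNle : N.length ≤ (pvZf g0 \ W).card := by
        rw [← hNcard]
        exact Finset.card_le_card hNsub
      have hfuel1 : 9 * (pvZf g0 \ (W ∪ N.toFinset)).card + (rest ++ N).length ≤ fuel := by
        rw [hcard2, List.length_append]
        simp only [List.length_cons] at hfuel
        omega
      obtain ⟨W', hWW', hW', hG', hval', hfin'⟩ :=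
        ih (W ∪ N.toFinset) g1 (rest ++ N) (riv + (N.length : Int)) hG1 hW1
          (by
            intro p hp
            rcases List.mem_append.mp hp with hp | hp
            · exact Finset.mem_union_left _ (hbuf p (List.mem_cons_of_mem _ hp))
            · exact Finset.mem_union_right _ (List.mem_toFinset.mpr hp))
          hfuel1
      have hrun : bfsLoopA (fuel + 1) g ((x, y) :: rest) n riv =
          bfsLoopA fuel g1 (rest ++ N) n (riv + (N.length : Int)) := by
        show bfsLoopA fuel (pvInnerA n x y (g, riv, rest)).1 (pvInnerA n x y (g, riv, rest)).2.2 n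
          (pvInnerA n x y (g, riv, rest)).2.1 = _
        rw [pv_innerA_eq, heq]
      refine ⟨W', Finset.Subset.trans Finset.subset_union_left hWW', hW', by rwa [hrun], ?_, ?_⟩
      · rw [hrun, hval']
        have hle : (W ∪ N.toFinset).card ≤ W'.card := Finset.card_le_card hWW'
        rw [hcard1] at hle ⊢
        push_cast
        omega
      · rw [hfin']
        have hsplit1 : ({q | q ∈ (x, y) :: rest} : Set (Int × Int)) =
            {((x, y) : Int × Int)} ∪ {q | q ∈ rest} := by
          ext p; simp [List.mem_cons]
        have hsplit2 : ({q | q ∈ rest ++ N} : Set (Int × Int)) =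
            {q | q ∈ rest} ∪ {q | q ∈ N} := by
          ext p; simp [List.mem_append]
        rw [hsplit1, hsplit2]
        exact (pv_finalA_step g0 n W N {q | q ∈ rest} (x, y) hxy hNrel).symm


theorem pv_dfsB (g0 : List (List Int)) (n : Int) :
    ∀ (fuel : Nat) (V : List (Int × Int)) (stack : List (Int × Int)) (cnt : Int),
      V.Nodup → (∀ p ∈ V, 0 ≤ p.1 ∧ 0 ≤ p.2 ∧ pvVal g0 p = 0) →
      (∀ p ∈ stack, 0 ≤ p.1 ∧ 0 ≤ p.2) →
      9 * (pvZf g0 \ V.toFinset).card + stack.length ≤ fuel →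
      ∃ V', dfsLoopB fuel g0 n V stack cnt =
          (V', cnt + ((V'.toFinset.card : Int) - (V.toFinset.card : Int))) ∧
        V'.Nodup ∧ (∀ p ∈ V', 0 ≤ p.1 ∧ 0 ≤ p.2 ∧ pvVal g0 p = 0) ∧
        V.toFinset ⊆ V'.toFinset ∧
        (↑V'.toFinset : Set (Int × Int)) = pvFinalB g0 n V.toFinset {q | q ∈ stack} := by
  intro fuel
  induction fuel with
  | zero =>
    intro V stack cnt hnd hok hst hfuel
    have hnil : stack = [] := List.length_eq_zero_iff.mp (by omega)
    subst hnil
    exact ⟨V, by simp [dfsLoopB], hnd, hok, Finset.Subset.refl _, (pv_finalB_nil g0 n _).symm⟩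
  | succ fuel ih =>
    intro V stack cnt hnd hok hst hfuel
    match stack with
    | [] =>
      exact ⟨V, by simp [dfsLoopB], hnd, hok, Finset.Subset.refl _, (pv_finalB_nil g0 n _).symm⟩
    | p :: rest =>
      have hsplit : ({q | q ∈ p :: rest} : Set (Int × Int)) = {p} ∪ {q | q ∈ rest} := by
        ext r; simp [List.mem_cons]
      by_cases hC : p ∈ V ∨ ¬ pvVal g0 p = 0
      · -- invalid pop: skip
        have hrun : dfsLoopB (fuel + 1) g0 n V (p :: rest) cnt = dfsLoopB fuel g0 n V rest cnt := by
          simp only [dfsLoopB]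
          rw [if_pos hC]
        obtain ⟨V', hval', hnd', hok', hsub', hfin'⟩ :=
          ih V rest cnt hnd hok (fun r hr => hst r (List.mem_cons_of_mem _ hr))
            (by simp only [List.length_cons] at hfuel; omega)
        refine ⟨V', by rwa [hrun], hnd', hok', hsub', ?_⟩
        rw [hfin', hsplit]
        refine (pv_finalB_drop g0 n V.toFinset {q | q ∈ rest} p ?_).symm
        rcases hC with h | h
        · exact Or.inl (List.mem_toFinset.mpr h)
        · exact Or.inr h
      · -- valid pop: visit p, push its neighbour square
        rw [not_or, not_not] at hC
        obtain ⟨hpV, hpz⟩ := hC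
        obtain ⟨hpx, hpy⟩ := hst p List.mem_cons_self
        have hadd : PySem.Set.add V p = V ++ [p] := by
          unfold PySem.Set.add
          rw [if_neg (by simpa [PySem.Set.contains_iff] using hpV)]
        have hrun : dfsLoopB (fuel + 1) g0 n V (p :: rest) cnt =
            dfsLoopB fuel g0 n (V ++ [p]) ((pvNbrs n p.1 p.2).reverse ++ rest) (cnt + 1) := by
          simp only [dfsLoopB]
          rw [if_neg (by rw [not_or, not_not]; exact ⟨hpV, hpz⟩), hadd]
        have hnd1 : (V ++ [p]).Nodup := by
          rw [List.nodup_append']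
          exact ⟨hnd, List.nodup_singleton p, List.disjoint_singleton.mpr hpV⟩
        have htf : (V ++ [p]).toFinset = insert p V.toFinset := by
          ext r
          simp [List.mem_toFinset]
        have hok1 : ∀ r ∈ V ++ [p], 0 ≤ r.1 ∧ 0 ≤ r.2 ∧ pvVal g0 r = 0 := by
          intro r hr
          rcases List.mem_append.mp hr with hr | hr
          · exact hok r hr
          · rw [List.mem_singleton.mp hr]; exact ⟨hpx, hpy, hpz⟩
        have hst1 : ∀ r ∈ (pvNbrs n p.1 p.2).reverse ++ rest, 0 ≤ r.1 ∧ 0 ≤ r.2 := by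
          intro r hr
          rcases List.mem_append.mp hr with hr | hr
          · have := (pv_mem_nbrs n p.1 p.2 r).mp (List.mem_reverse.mp hr)
            exact ⟨this.1.1, this.1.2.2.1⟩
          · exact hst r (List.mem_cons_of_mem _ hr)
        have hpZ : p ∈ pvZf g0 \ V.toFinset := by
          rw [Finset.mem_sdiff, pv_mem_Zf]
          exact ⟨⟨pv_val_zero_mem g0 p hpx hpy hpz, hpz⟩, by simpa [List.mem_toFinset] using hpV⟩
        have herase : pvZf g0 \ (V ++ [p]).toFinset = (pvZf g0 \ V.toFinset).erase p := by
          rw [htf]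
          ext r
          simp only [Finset.mem_sdiff, Finset.mem_insert, Finset.mem_erase]
          tauto
        have hcard : (pvZf g0 \ (V ++ [p]).toFinset).card = (pvZf g0 \ V.toFinset).card - 1 := by
          rw [herase, Finset.card_erase_of_mem hpZ]
        have hfuel1 : 9 * (pvZf g0 \ (V ++ [p]).toFinset).card +
            ((pvNbrs n p.1 p.2).reverse ++ rest).length ≤ fuel := by
          rw [hcard, List.length_append, List.length_reverse]
          have h9 := pv_length_nbrs_le n p.1 p.2
          have hpos : 1 ≤ (pvZf g0 \ V.toFinset).card := Finset.card_pos.mpr ⟨p, hpZ⟩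
          simp only [List.length_cons] at hfuel
          omega
        obtain ⟨V', hval', hnd', hok', hsub', hfin'⟩ :=
          ih (V ++ [p]) ((pvNbrs n p.1 p.2).reverse ++ rest) (cnt + 1) hnd1 hok1 hst1 hfuel1
        have hcard1 : (V ++ [p]).toFinset.card = V.toFinset.card + 1 := by
          rw [htf, Finset.card_insert_of_notMem (by simpa [List.mem_toFinset] using hpV)]
        refine ⟨V', ?_, hnd', hok', ?_, ?_⟩
        · rw [hrun, hval']
          have hle : (V ++ [p]).toFinset.card ≤ V'.toFinset.card := Finset.card_le_card hsub'
          rw [hcard1] at hle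
          have : cnt + 1 + ((V'.toFinset.card : Int) - ((V ++ [p]).toFinset.card : Int)) =
              cnt + ((V'.toFinset.card : Int) - (V.toFinset.card : Int)) := by
            rw [hcard1]; push_cast; omega
          rw [this]
        · exact Finset.Subset.trans (htf ▸ Finset.subset_insert p V.toFinset) hsub'
        · rw [hfin', hsplit, htf]
          have hsplit2 : ({q | q ∈ (pvNbrs n p.1 p.2).reverse ++ rest} : Set (Int × Int)) =
              {q | q ∈ rest} ∪ {q | q ∈ pvNbrs n p.1 p.2} := by
            ext r; simp [List.mem_append, List.mem_reverse]; tauto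
          rw [hsplit2]
          exact (pv_finalB_step g0 n V.toFinset (pvNbrs n p.1 p.2) {q | q ∈ rest} p
            (by simpa [List.mem_toFinset] using hpV) hpz (pv_mem_nbrs n p.1 p.2)).symm

theorem pv_seed (g0 : List (List Int)) (n : Int) (W : Finset (Int × Int)) (g : List (List Int))
    (V : List (Int × Int)) (s : Int × Int) (hG : pvGRel g0 W g) (hW : pvWok g0 W)
    (hnd : V.Nodup) (hok : ∀ p ∈ V, 0 ≤ p.1 ∧ 0 ≤ p.2 ∧ pvVal g0 p = 0)
    (hVW : V.toFinset = W) (hsx : 0 ≤ s.1) (hsy : 0 ≤ s.2) (hval : pvVal g s = 0) :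
    ∃ W', pvGRel g0 W' (check_neighbors g s.1 s.2 n).1 ∧ pvWok g0 W' ∧
      (dfsLoopB (9 * pvZeroCount g0 + 1) g0 n V [s] 0).1.Nodup ∧
      (∀ p ∈ (dfsLoopB (9 * pvZeroCount g0 + 1) g0 n V [s] 0).1,
        0 ≤ p.1 ∧ 0 ≤ p.2 ∧ pvVal g0 p = 0) ∧
      (dfsLoopB (9 * pvZeroCount g0 + 1) g0 n V [s] 0).1.toFinset = W' ∧
      (check_neighbors g s.1 s.2 n).2 = (dfsLoopB (9 * pvZeroCount g0 + 1) g0 n V [s] 0).2 := by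
  obtain ⟨hz0, hsW⟩ := (pv_grel_val g0 W g hG s hsx hsy).mp hval
  have hG1 : pvGRel g0 (insert s W) (pvSet g s.1 s.2 (-1)) :=
    pv_grel_insert g0 W g hG s hsx hsy hval
  have hW1 : pvWok g0 (insert s W) := pv_wok_insert g0 W hW s hsx hsy hz0
  have hZ1 : pvZf (pvSet g s.1 s.2 (-1)) = pvZf g0 \ insert s W :=
    pv_Zf_eq g0 (insert s W) _ hG1 hW1
  have hfuelA : 9 * (pvZf g0 \ insert s W).card + ([s] : List (Int × Int)).length ≤
      9 * pvZeroCount (pvSet g s.1 s.2 (-1)) + 1 := by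
    have := pv_card_Zf_le (pvSet g s.1 s.2 (-1))
    rw [hZ1] at this
    simp only [List.length_singleton]
    omega
  obtain ⟨WA, hWWA, hWokA, hGA, hvalA, hfinA⟩ :=
    pv_bfsA g0 n (9 * pvZeroCount (pvSet g s.1 s.2 (-1)) + 1) (insert s W)
      (pvSet g s.1 s.2 (-1)) [s] 1 hG1 hW1
      (by intro p hp; rw [List.mem_singleton.mp hp]; exact Finset.mem_insert_self _ _) hfuelA
  have hfuelB : 9 * (pvZf g0 \ V.toFinset).card + ([s] : List (Int × Int)).length ≤
      9 * pvZeroCount g0 + 1 := by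
    have h1 : (pvZf g0 \ V.toFinset).card ≤ (pvZf g0).card :=
      Finset.card_le_card (Finset.sdiff_subset)
    have h2 := pv_card_Zf_le g0
    simp only [List.length_singleton]
    omega
  obtain ⟨V', hvalB, hndB, hokB, hsubB, hfinB⟩ :=
    pv_dfsB g0 n (9 * pvZeroCount g0 + 1) V [s] 0 hnd hok
      (by intro p hp; rw [List.mem_singleton.mp hp]; exact ⟨hsx, hsy⟩) hfuelB
  have hsets : (↑(V'.toFinset) : Set (Int × Int)) = ↑WA := by
    rw [hfinB, hfinA]
    have hone : ({q | q ∈ ([s] : List (Int × Int))} : Set (Int × Int)) = {s} := by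
      ext r; simp
    rw [hone, hVW]
    exact pv_seed_sets g0 n W s hsW hz0
  have hVWA : V'.toFinset = WA := Finset.coe_injective hsets
  have hcardW1 : (insert s W).card = W.card + 1 := Finset.card_insert_of_notMem hsW
  have hcardV : V.toFinset.card = W.card := by rw [hVW]
  have hleA : (insert s W).card ≤ WA.card := Finset.card_le_card hWWA
  refine ⟨WA, ?_, hWokA, ?_, ?_, ?_, ?_⟩
  · show pvGRel g0 WA (bfsLoopA _ _ _ _ _).1
    exact hGA
  · rw [hvalB]; exact hndB
  · rw [hvalB]; exact hokB
  · rw [hvalB]; exact hVWA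
  · show (bfsLoopA _ _ _ _ _).2 = _
    rw [hvalA, hvalB]
    simp only
    rw [hVWA, hcardV, hcardW1]
    push_cast
    omega

theorem pv_shape_getD (g : List (List Int)) (i : Nat) :
    (g.getD i []).length = (pvShape g).getD i 0 := by
  by_cases hi : i < g.length
  · rw [List.getD_eq_getElem _ _ hi]
    unfold pvShape
    rw [List.getD_eq_getElem _ _ (by simpa using hi)]
    simp
  · rw [List.getD_eq_default _ _ (by omega), List.getD_eq_default]
    · rfl
    · simpa [pvShape] using Nat.le_of_not_lt hi

theorem pv_inner_joint (land : List (List Int)) (n : Int) (i : Nat) :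
    ∀ (js : List Nat) (g : List (List Int)) (V : List (Int × Int)) (szA szB : List Int)
      (W : Finset (Int × Int)),
      pvGRel land W g → pvWok land W → V.Nodup →
      (∀ p ∈ V, 0 ≤ p.1 ∧ 0 ≤ p.2 ∧ pvVal land p = 0) → V.toFinset = W → szA = szB →
      ∃ g' V' W' szs,
        js.foldl (fun (st : List (List Int) × List Int) (j : Nat) =>
            if pvVal st.1 ((i : Int), (j : Int)) = 0 then
              let r := check_neighbors st.1 (i : Int) (j : Int) n
              (r.1, st.2 ++ [r.2])
            else st) (g, szA) = (g', szs) ∧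
        js.foldl (fun (st : List (Int × Int) × List Int) (j : Nat) =>
            if pvVal land ((i : Int), (j : Int)) = 0 ∧ ((i : Int), (j : Int)) ∉ st.1 then
              let r := dfsLoopB (9 * pvZeroCount land + 1) land n st.1 [((i : Int), (j : Int))] 0
              (r.1, st.2 ++ [r.2])
            else st) (V, szB) = (V', szs) ∧
        pvGRel land W' g' ∧ pvWok land W' ∧ V'.Nodup ∧
        (∀ p ∈ V', 0 ≤ p.1 ∧ 0 ≤ p.2 ∧ pvVal land p = 0) ∧ V'.toFinset = W' := by
  intro js
  induction js with
  | nil =>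
    intro g V szA szB W hG hW hnd hok hVW hsz
    exact ⟨g, V, W, szA, by simp, by simp [hsz], hG, hW, hnd, hok, hVW⟩
  | cons j js ih =>
    intro g V szA szB W hG hW hnd hok hVW hsz
    simp only [List.foldl_cons]
    set s : Int × Int := ((i : Int), (j : Int)) with hsdef
    have hsx : (0:Int) ≤ s.1 := Int.natCast_nonneg i
    have hsy : (0:Int) ≤ s.2 := Int.natCast_nonneg j
    have hiff : pvVal g s = 0 ↔ (pvVal land s = 0 ∧ s ∉ V) := by
      rw [pv_grel_val land W g hG s hsx hsy]
      constructor
      · rintro ⟨h1, h2⟩; exact ⟨h1, fun hv => h2 (hVW ▸ List.mem_toFinset.mpr hv)⟩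
      · rintro ⟨h1, h2⟩; exact ⟨h1, fun hw => h2 (List.mem_toFinset.mp (hVW ▸ hw :))⟩
    by_cases hC : pvVal land s = 0 ∧ s ∉ V
    · rw [if_pos (hiff.mpr hC), if_pos hC]
      obtain ⟨W', hG', hW', hnd', hok', hVW', hval⟩ :=
        pv_seed land n W g V s hG hW hnd hok hVW hsx hsy (hiff.mpr hC)
      exact ih (check_neighbors g s.1 s.2 n).1
        (dfsLoopB (9 * pvZeroCount land + 1) land n V [s] 0).1
        (szA ++ [(check_neighbors g s.1 s.2 n).2])
        (szB ++ [(dfsLoopB (9 * pvZeroCount land + 1) land n V [s] 0).2]) W'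
        hG' hW' hnd' hok' hVW' (by rw [hsz, hval])
    · rw [if_neg (fun h => hC (hiff.mp h)), if_neg hC]
      exact ih g V szA szB W hG hW hnd hok hVW hsz

theorem pv_outer_joint (land : List (List Int)) (n : Int) :
    ∀ (is : List Nat) (g : List (List Int)) (V : List (Int × Int)) (szA szB : List Int)
      (W : Finset (Int × Int)),
      pvGRel land W g → pvWok land W → V.Nodup →
      (∀ p ∈ V, 0 ≤ p.1 ∧ 0 ≤ p.2 ∧ pvVal land p = 0) → V.toFinset = W → szA = szB →
      (is.foldl (fun (st : List (List Int) × List Int) (i : Nat) =>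
          (List.range ((st.1.getD i []).length)).foldl
            (fun (st : List (List Int) × List Int) (j : Nat) =>
              if pvVal st.1 ((i : Int), (j : Int)) = 0 then
                let r := check_neighbors st.1 (i : Int) (j : Int) n
                (r.1, st.2 ++ [r.2])
              else st) st) (g, szA)).2 =
      (is.foldl (fun (st : List (Int × Int) × List Int) (i : Nat) =>
          (List.range ((land.getD i []).length)).foldl
            (fun (st : List (Int × Int) × List Int) (j : Nat) =>
              if pvVal land ((i : Int), (j : Int)) = 0 ∧ ((i : Int), (j : Int)) ∉ st.1 then
                let r := dfsLoopB (9 * pvZeroCount land + 1) land n st.1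
                  [((i : Int), (j : Int))] 0
                (r.1, st.2 ++ [r.2])
              else st) st) (V, szB)).2 := by
  intro is
  induction is with
  | nil =>
    intro g V szA szB W hG hW hnd hok hVW hsz
    simpa using hsz
  | cons i is ih =>
    intro g V szA szB W hG hW hnd hok hVW hsz
    simp only [List.foldl_cons]
    have hlen : (g.getD i []).length = (land.getD i []).length := by
      rw [pv_shape_getD, pv_shape_getD, hG.1]
    rw [hlen]
    obtain ⟨g', V', W', szs, hA, hB, hG', hW', hnd', hok', hVW'⟩ :=
      pv_inner_joint land n i (List.range ((land.getD i []).length)) g V szA szB W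
        hG hW hnd hok hVW hsz
    rw [hA, hB]
    exact ih g' V' szs szs W' hG' hW' hnd' hok' hVW' rfl

-- ===== VERDICT (by name: the statement is the Claim_ definition above) =====
theorem compute_pond_sizes_spec : Claim_equal_compute_pond_sizes := by
  intro land _hDom _hPre
  show compute_pond_sizes land = compute_pond_sizes_alt land
  have hG0 : pvGRel land ∅ land := ⟨rfl, fun p _ _ => by simp⟩
  have hW0 : pvWok land ∅ := fun p hp => absurd hp (Finset.notMem_empty p)
  exact pv_outer_joint land (land.length : Int) (List.range land.length) land [] [] [] ∅
    hG0 hW0 List.nodup_nil (fun p hp => absurd hp (List.not_mem_nil)) rfl rfl
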